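-- pv_equiv track=rewrite | github.com/jayim243/python-projects | Hawaiian Words.py | validWord
-- ===== SOURCE A (Python) =====
-- def validWord(word):
--     x = True
--     val_chr1 = ['a', 'e', 'i', 'o', 'u', 'p', 'k', 'h', 'l', 'm', 'n', 'w', ' ', '\'', ',', '.']
--     val_chr2 = ['a', 'e', 'i', 'o', 'u', 'p', 'k', 'h', 'l', 'm', 'n', 'w', ' ', '\'', ',']
--     if word[0] == '.' or word[-1] == '.':
--         for char in word.lower():
--             if char not in val_chr1:
--                 x = False
--     else:
--         for char in word.lower():
--             if char not in val_chr2: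
--                 x = False
--     return x
-- ===== SOURCE B (Python) =====
-- def validWord(word):
--     allowed = "aeioupkhlmnw ',"
--     if word[0] == '.' or word[-1] == '.':
--         allowed += '.'
--     low = word.lower()
--     return sum(low.count(c) for c in allowed) == len(low)
-- ===== Notes on version B (the rewrite author's own statement) =====
-- stated objective: alternative
-- what changed: Instead of scanning the word character by character with a boolean flag, B iterates over the (distinct) allowed alphabet, counts each allowed letter's occurrences in the lowercased word with str.count, and declares the word valid iff the counts sum to the word's length.
import Mathlib
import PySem

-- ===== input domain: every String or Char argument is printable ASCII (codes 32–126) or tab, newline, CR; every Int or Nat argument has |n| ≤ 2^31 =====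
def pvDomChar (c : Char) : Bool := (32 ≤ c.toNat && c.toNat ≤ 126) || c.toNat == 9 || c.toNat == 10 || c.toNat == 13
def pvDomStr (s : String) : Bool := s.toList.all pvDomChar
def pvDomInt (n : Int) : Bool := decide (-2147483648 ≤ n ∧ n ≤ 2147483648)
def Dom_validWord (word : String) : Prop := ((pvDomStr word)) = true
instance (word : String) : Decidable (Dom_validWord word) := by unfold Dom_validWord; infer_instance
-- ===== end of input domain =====

-- B replaces A's per-character flag loop by counting each allowed letter's occurrences and comparing the total to the word's length; an alternative decomposition (a timing run measured it faster in CPython).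

-- ===== PORT A =====
def validWord (word : String) : Bool :=
  let val_chr1 : List Char := ['a', 'e', 'i', 'o', 'u', 'p', 'k', 'h', 'l', 'm', 'n', 'w', ' ', '\'', ',', '.']
  let val_chr2 : List Char := ['a', 'e', 'i', 'o', 'u', 'p', 'k', 'h', 'l', 'm', 'n', 'w', ' ', '\'', ',']
  match PySem.Str.pyGet? word 0, PySem.Str.pyGet? word (-1) with
  | some c0, some cl =>
    if c0 = '.' ∨ cl = '.' then
      (PySem.Str.lower word).toList.foldl (fun x ch => if ch ∉ val_chr1 then false else x) true
    else
      (PySem.Str.lower word).toList.foldl (fun x ch => if ch ∉ val_chr2 then false else x) true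
  | _, _ => false  -- word[0] raises IndexError on the empty word: excluded by Pre_

-- ===== PORT B =====
def validWord_alt (word : String) : Bool :=
  match PySem.Str.pyGet? word 0 with
  | none => false  -- word[0] raises IndexError on the empty word: excluded by Pre_
  | some c0 =>
    match PySem.Str.pyGet? word (-1) with
    | none => false
    | some cl =>
      let allowed : List Char :=
        if c0 = '.' ∨ cl = '.' then "aeioupkhlmnw ',".toList ++ ['.'] else "aeioupkhlmnw ',".toList
      let low := PySem.Str.lower word
      (allowed.map (fun c => (PySem.Str.count low (String.ofList [c]) : Int))).sum == PySem.Str.len low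

-- ===== PRECONDITION & SPEC =====
-- Pre_ excludes only the empty word, on which A raises IndexError at word[0].
def Pre_validWord (word : String) : Prop := word ≠ ""
instance (word : String) : Decidable (Pre_validWord word) := by unfold Pre_validWord; infer_instance
def pvWitness_validWord : String := "aloha"
def Spec_validWord (word : String) (out : Bool) : Prop := out = validWord_alt word
instance (word : String) (out : Bool) : Decidable (Spec_validWord word out) := by unfold Spec_validWord; infer_instance

-- ===== CLAIM (what is proved, stated in full; the proofs are below) =====
def Claim_equal_validWord : Prop := ∀ (word : String), Dom_validWord word → Pre_validWord word → Spec_validWord word (validWord word)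

-- ===== LEMMAS AND PROOFS =====

-- A's loop: starting from flag b, the fold returns b && (every char is in v).
theorem pv_foldl_flag (v : List Char) (l : List Char) (b : Bool) :
    l.foldl (fun x ch => if ch ∉ v then false else x) b = (b && l.all (fun c => c ∈ v)) := by
  induction l generalizing b with
  | nil => simp
  | cons c l ih =>
    simp only [List.foldl_cons, List.all_cons, ih]
    by_cases h : c ∈ v
    · simp [h]
    · simp [h]

-- Python's str.count for a single-character needle is List.count.
theorem pv_count_go_singleton (c : Char) (l : List Char) (fuel acc : Nat) (h : l.length ≤ fuel) :
    PySem.Chars.count.go [c] fuel l acc = acc + l.count c := by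
  induction l generalizing fuel acc with
  | nil => cases fuel <;> simp [PySem.Chars.count.go]
  | cons a t ih =>
    cases fuel with
    | zero => simp at h
    | succ n =>
      have ht : t.length ≤ n := by simpa using h
      by_cases hac : c = a
      · subst hac
        simp [PySem.Chars.count.go, List.isPrefixOf, ih _ _ ht]
        omega
      · have hpf : ([c].isPrefixOf (a :: t)) = false := by
          simp [List.isPrefixOf, hac]
        simp [PySem.Chars.count.go, hpf, ih _ _ ht, List.count_cons]
        intro hh; exact absurd hh.symm hac

theorem pv_count_singleton (s : List Char) (c : Char) :
    PySem.Chars.count s [c] = s.count c := by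
  simp [PySem.Chars.count]
  simpa using pv_count_go_singleton c s s.length 0 le_rfl

-- Summing the per-letter counts over a duplicate-free alphabet counts the positions holding an allowed letter.
theorem pv_sum_counts (v : List Char) (hv : v.Nodup) (l : List Char) :
    (v.map (fun c => (l.count c : Int))).sum = (l.countP (fun a => a ∈ v) : Int) := by
  induction l with
  | nil => simp
  | cons a t ih =>
    have hstep : (v.map (fun c => ((a :: t).count c : Int))).sum
        = (v.map (fun c => (t.count c : Int))).sum + (v.map (fun c => if a = c then (1 : Int) else 0)).sum := by
      rw [← List.sum_map_add]
      congr 1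
      apply List.map_congr_left
      intro c _
      by_cases h : a = c <;> simp [h]
    have hone : ∀ (v : List Char), v.Nodup →
        (v.map (fun c => if a = c then (1 : Int) else 0)).sum = if a ∈ v then (1 : Int) else 0 := by
      intro v hv
      induction v with
      | nil => simp
      | cons b w ihw =>
        have hw : w.Nodup := hv.of_cons
        by_cases hab : a = b
        · subst hab
          have : a ∉ w := by simpa using (List.nodup_cons.mp hv).1
          simp [ihw hw, this]
        · simp [hab, ihw hw]
    rw [hstep, ih, hone v hv, List.countP_cons]
    by_cases hm : a ∈ v <;> simp [hm]

-- countP = length iff every element satisfies the predicate (cast to Int).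
theorem pv_countP_eq_length_iff (v l : List Char) :
    ((l.countP (fun a => a ∈ v) : Int) == (l.length : Int)) = l.all (fun c => c ∈ v) := by
  by_cases h : ∀ a ∈ l, decide (a ∈ v) = true
  · have := List.countP_eq_length.mpr h
    simp [this, List.all_eq_true.mpr h]
  · have hne : l.countP (fun a => a ∈ v) ≠ l.length := by
      intro hc; exact h (List.countP_eq_length.mp hc)
    have hall : l.all (fun c => c ∈ v) = false := by
      rw [Bool.eq_false_iff]; intro hc; exact h (List.all_eq_true.mp hc)
    rw [hall]
    rw [beq_eq_false_iff_ne]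
    intro hc; exact hne (by exact_mod_cast hc)

theorem validWord_spec_aux (word : String) (h : Pre_validWord word) :
    validWord word = validWord_alt word := by
  unfold validWord validWord_alt
  have hne : word.toList ≠ [] := by
    intro hnil
    exact h (String.toList_inj.mp (by simpa using hnil))
  have h0 : ∃ c, PySem.Str.pyGet? word 0 = some c := by
    cases hl : word.toList with
    | nil => exact absurd hl hne
    | cons c t => exact ⟨c, by simp [PySem.Str.pyGet?, hl]⟩
  have h1 : ∃ c, PySem.Str.pyGet? word (-1) = some c := by
    have heq : PySem.Str.pyGet? word (-1) = word.toList.getLast? := by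
      simp [PySem.Str.pyGet?, PySem.List.pyGet?_neg_one]
    cases hg : word.toList.getLast? with
    | none => exact absurd (List.getLast?_eq_none_iff.mp hg) hne
    | some c => exact ⟨c, by rw [heq, hg]⟩
  obtain ⟨c0, hc0⟩ := h0
  obtain ⟨cl, hcl⟩ := h1
  rw [hc0, hcl]
  simp only [PySem.Str.count_eq, PySem.Str.len_eq]
  split_ifs with hdot
  · rw [pv_foldl_flag]
    have hv : ("aeioupkhlmnw ',".toList ++ ['.'] : List Char)
        = ['a', 'e', 'i', 'o', 'u', 'p', 'k', 'h', 'l', 'm', 'n', 'w', ' ', '\'', ',', '.'] := by decide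
    rw [hv]
    have hnd : (['a', 'e', 'i', 'o', 'u', 'p', 'k', 'h', 'l', 'm', 'n', 'w', ' ', '\'', ',', '.'] : List Char).Nodup := by decide
    have : ∀ c, PySem.Chars.count (PySem.Str.lower word).toList (String.ofList [c]).toList
        = (PySem.Str.lower word).toList.count c := by
      intro c; simpa [String.toList_ofList] using pv_count_singleton (PySem.Str.lower word).toList c
    simp only [this, pv_sum_counts _ hnd, pv_countP_eq_length_iff]
    simp
  · rw [pv_foldl_flag]
    have hnd : (['a', 'e', 'i', 'o', 'u', 'p', 'k', 'h', 'l', 'm', 'n', 'w', ' ', '\'', ','] : List Char).Nodup := by decide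
    have hv : ("aeioupkhlmnw ',".toList : List Char)
        = ['a', 'e', 'i', 'o', 'u', 'p', 'k', 'h', 'l', 'm', 'n', 'w', ' ', '\'', ','] := by decide
    rw [hv]
    have : ∀ c, PySem.Chars.count (PySem.Str.lower word).toList (String.ofList [c]).toList
        = (PySem.Str.lower word).toList.count c := by
      intro c; simpa [String.toList_ofList] using pv_count_singleton (PySem.Str.lower word).toList c
    simp only [this, pv_sum_counts _ hnd, pv_countP_eq_length_iff]
    simp

-- ===== VERDICT (by name: the statement is the Claim_ definition above) =====
theorem validWord_spec : Claim_equal_validWord := by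
  intro word _ hpre
  unfold Spec_validWord
  exact validWord_spec_aux word hpre
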